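-- pv_equiv track=rewrite | github.com/prina404/AoC | 2025/09/solution.py | solve
-- ===== SOURCE A (Python) =====
-- def point_in_rect(px, py, x1, y1, x2, y2):
--     x1, x2 = min(x1, x2), max(x1, x2)
--     y1, y2 = min(y1, y2), max(y1, y2)
--     return x1 < px < x2 and y1 < py < y2
--
-- def line_rect_intersect(edge, rect):
--     (x1_e, y1_e), (x2_e, y2_e) = edge
--     x1_r, y1_r, x2_r, y2_r = rect
--     xe, Xe = min(x1_e, x2_e), max(x1_e, x2_e)
--     xr, Xr = min(x1_r, x2_r), max(x1_r, x2_r)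
--     yr, Yr = min(y1_r, y2_r), max(y1_r, y2_r)
--     return ((xe <= xr and Xe >= Xr) or (Xe >= Xr and xe == xr)) and (yr < y1_e < Yr)
--
-- def solve(tiles: list[tuple[int, int]]) -> tuple[int, int]:
--     rectangles = {}
--     for i in range(len(tiles) - 1):
--         for j in range(1, len(tiles)):
--             x1, y1 = tiles[i]
--             x2, y2 = tiles[j]
--             rectangles[(x1, y1, x2, y2)] = (abs(x2 - x1) + 1) * (abs(y2 - y1) + 1)
--
--     rectangles = dict(sorted(rectangles.items(), key=lambda x: x[1], reverse=True))
--     horizontal_lines = [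
--         (tiles[i], tiles[i + 1]) for i in range(len(tiles) - 1) if tiles[i][1] == tiles[i + 1][1]
--     ]
--
--     for rect in rectangles:
--         contains_tiles = False
--         for tx, ty in tiles:
--             if point_in_rect(tx, ty, *rect):
--                 contains_tiles = True
--                 break
--         if contains_tiles:
--             continue
--
--         line_intersections = 0
--         for line in horizontal_lines:
--             line_intersections += line_rect_intersect(line, rect)
--
--         if line_intersections == 0:
--             return max(rectangles.values()), rectangles[rect]
-- ===== SOURCE B (Python) =====
-- def solve(tiles: list[tuple[int, int]]) -> tuple[int, int]:
--     n = len(tiles)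
--     hlines = [(tiles[i], tiles[i + 1]) for i in range(n - 1) if tiles[i][1] == tiles[i + 1][1]]
--
--     def valid(x1, y1, x2, y2):
--         lx, hx = min(x1, x2), max(x1, x2)
--         ly, hy = min(y1, y2), max(y1, y2)
--         for tx, ty in tiles:
--             if lx < tx < hx and ly < ty < hy:
--                 return False
--         for (ex1, ey), (ex2, _) in hlines:
--             if min(ex1, ex2) <= lx and max(ex1, ex2) >= hx and ly < ey < hy:
--                 return False
--         return True
--
--     overall = None
--     best = None
--     for i in range(n - 1):
--         x1, y1 = tiles[i]
--         for j in range(1, n):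
--             x2, y2 = tiles[j]
--             area = (abs(x2 - x1) + 1) * (abs(y2 - y1) + 1)
--             if overall is None or area > overall:
--                 overall = area
--             if (best is None or area > best) and valid(x1, y1, x2, y2):
--                 best = area
--     if best is not None:
--         return overall, best
-- ===== Notes on version B (the rewrite author's own statement) =====
-- stated objective: alternative
-- what changed: B drops A's dict of rectangles and descending sort entirely: it makes one pass over the same (i,j) candidate pairs keeping two running maxima (overall area, and best area among rectangles that contain no tile strictly inside and cross no horizontal tile line), which equals A's first-valid-in-sorted-order result.
-- outside the precondition, e.g. on solve([(0, 0)]): A returns None, B returns None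
import Mathlib
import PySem

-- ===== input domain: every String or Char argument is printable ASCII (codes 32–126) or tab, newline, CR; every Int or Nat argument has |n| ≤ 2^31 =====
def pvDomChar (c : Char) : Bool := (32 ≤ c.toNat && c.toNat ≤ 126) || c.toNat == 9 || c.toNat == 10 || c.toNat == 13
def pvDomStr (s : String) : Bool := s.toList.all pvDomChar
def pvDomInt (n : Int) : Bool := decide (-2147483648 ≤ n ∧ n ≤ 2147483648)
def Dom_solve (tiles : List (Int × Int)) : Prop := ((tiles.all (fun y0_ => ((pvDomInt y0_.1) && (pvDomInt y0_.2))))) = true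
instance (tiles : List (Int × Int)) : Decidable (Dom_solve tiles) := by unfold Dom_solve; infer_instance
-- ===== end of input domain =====

-- B replaces A's build-dict / sort-by-area / first-valid-wins scan by a single pass over the same
-- candidate pairs keeping two running maxima (overall area, best valid area); equivalence is proved
-- on tiles lists of length ≥ 2 (on shorter input Python A returns None, outside the return type).

-- ===== PORT A =====
def pointInRect (px py x1 y1 x2 y2 : Int) : Bool :=
  (min x1 x2 < px && px < max x1 x2) && (min y1 y2 < py && py < max y1 y2)

def lineRectIntersect (edge : (Int × Int) × (Int × Int)) (rect : Int × Int × Int × Int) : Bool :=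
  let xe := min edge.1.1 edge.2.1
  let Xe := max edge.1.1 edge.2.1
  let xr := min rect.1 rect.2.2.1
  let Xr := max rect.1 rect.2.2.1
  let yr := min rect.2.1 rect.2.2.2
  let Yr := max rect.2.1 rect.2.2.2
  ((xe ≤ xr && Xe ≥ Xr) || (Xe ≥ Xr && xe == xr)) && (yr < edge.1.2 && edge.1.2 < Yr)

def horizLinesA (tiles : List (Int × Int)) : List ((Int × Int) × (Int × Int)) :=
  ((PySem.List.pyRange 0 (PySem.List.len tiles - 1) 1).filter (fun i =>
      (PySem.List.pyGetD tiles i (0, 0)).2 == (PySem.List.pyGetD tiles (i + 1) (0, 0)).2)).map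
    (fun i => (PySem.List.pyGetD tiles i (0, 0), PySem.List.pyGetD tiles (i + 1) (0, 0)))

def solveLoopA (tiles : List (Int × Int)) (hls : List ((Int × Int) × (Int × Int)))
    (d : PySem.Dict (Int × Int × Int × Int) Int) : List (Int × Int × Int × Int) → Int × Int
  | [] => (0, 0)  -- Python A falls through (returns None) here; unreachable under Pre_solve
  | r :: rest =>
    let containsTiles := tiles.any (fun t => pointInRect t.1 t.2 r.1 r.2.1 r.2.2.1 r.2.2.2)
    if containsTiles then solveLoopA tiles hls d rest
    else
      let li := hls.foldl (fun acc line => acc + (if lineRectIntersect line r then (1 : Int) else 0)) 0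
      if li == 0 then ((PySem.List.max? d.values (fun v => v)).getD 0, d.getD r 0)
      else solveLoopA tiles hls d rest

def solve (tiles : List (Int × Int)) : Int × Int :=
  let n := PySem.List.len tiles
  let rectangles := (PySem.List.pyRange 0 (n - 1) 1).foldl (fun d i =>
      (PySem.List.pyRange 1 n 1).foldl (fun d j =>
        let t1 := PySem.List.pyGetD tiles i (0, 0)
        let t2 := PySem.List.pyGetD tiles j (0, 0)
        d.insert (t1.1, t1.2, t2.1, t2.2) ((|t2.1 - t1.1| + 1) * (|t2.2 - t1.2| + 1))) d)
    (PySem.Dict.empty : PySem.Dict (Int × Int × Int × Int) Int)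
  let rectangles2 := PySem.Dict.ofList (PySem.List.sorted rectangles.items (fun p => p.2) true)
  solveLoopA tiles (horizLinesA tiles) rectangles2 rectangles2.keys

-- ===== PORT B =====
def horizLinesB (tiles : List (Int × Int)) : List ((Int × Int) × (Int × Int)) :=
  ((PySem.List.pyRange 0 (PySem.List.len tiles - 1) 1).filter (fun i =>
      (PySem.List.pyGetD tiles i (0, 0)).2 == (PySem.List.pyGetD tiles (i + 1) (0, 0)).2)).map
    (fun i => (PySem.List.pyGetD tiles i (0, 0), PySem.List.pyGetD tiles (i + 1) (0, 0)))

def bValid (tiles : List (Int × Int)) (hls : List ((Int × Int) × (Int × Int))) (x1 y1 x2 y2 : Int) : Bool :=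
  let lx := min x1 x2
  let hx := max x1 x2
  let ly := min y1 y2
  let hy := max y1 y2
  if tiles.any (fun t => lx < t.1 && t.1 < hx && ly < t.2 && t.2 < hy) then false
  else if hls.any (fun l => min l.1.1 l.2.1 ≤ lx && hx ≤ max l.1.1 l.2.1 && ly < l.1.2 && l.1.2 < hy) then false
  else true

def solve_alt (tiles : List (Int × Int)) : Int × Int :=
  let n := PySem.List.len tiles
  let hlines := horizLinesB tiles
  let st := (PySem.List.pyRange 0 (n - 1) 1).foldl (fun st i =>
      let t1 := PySem.List.pyGetD tiles i (0, 0)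
      (PySem.List.pyRange 1 n 1).foldl (fun st j =>
        let t2 := PySem.List.pyGetD tiles j (0, 0)
        let area := (|t2.1 - t1.1| + 1) * (|t2.2 - t1.2| + 1)
        let overall := match st.1 with
          | none => some area
          | some m => if area > m then some area else some m
        let best := if (match st.2 with
              | none => true
              | some b => area > b) && bValid tiles hlines t1.1 t1.2 t2.1 t2.2
            then some area else st.2
        (overall, best)) st)
    ((none, none) : Option Int × Option Int)
  match st.2 with
  | some b => (st.1.getD 0, b)
  | none => (0, 0)

-- ===== PRECONDITION & SPEC =====
-- Pre_solve excludes tiles lists of length < 2, on which Python A returns None, not a pair of ints.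
def Pre_solve (tiles : List (Int × Int)) : Prop := 2 ≤ tiles.length
instance (tiles : List (Int × Int)) : Decidable (Pre_solve tiles) := by unfold Pre_solve; infer_instance
def pvWitness_solve : (List (Int × Int)) := ([(0, 0), (2, 3)])
def Spec_solve (tiles : List (Int × Int)) (out : Int × Int) : Prop := out = solve_alt tiles
instance (tiles : List (Int × Int)) (out : Int × Int) : Decidable (Spec_solve tiles out) := by unfold Spec_solve; infer_instance

-- ===== CLAIM (what is proved, stated in full; the proofs are below) =====
def Claim_equal_solve : Prop := ∀ (tiles : List (Int × Int)), Dom_solve tiles → Pre_solve tiles → Spec_solve tiles (solve tiles)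

-- ===== LEMMAS AND PROOFS =====

-- the area A stores for a rectangle key, as a function of the key
def pvArea (r : Int × Int × Int × Int) : Int := (|r.2.2.1 - r.1| + 1) * (|r.2.2.2 - r.2.1| + 1)

-- the candidate rectangles, in A's (and B's) generation order
def pvCands (tiles : List (Int × Int)) : List (Int × Int × Int × Int) :=
  (PySem.List.pyRange 0 (PySem.List.len tiles - 1) 1).flatMap (fun i =>
    (PySem.List.pyRange 1 (PySem.List.len tiles) 1).map (fun j =>
      ((PySem.List.pyGetD tiles i (0, 0)).1, (PySem.List.pyGetD tiles i (0, 0)).2,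
       (PySem.List.pyGetD tiles j (0, 0)).1, (PySem.List.pyGetD tiles j (0, 0)).2)))

def pvOk (tiles : List (Int × Int)) (r : Int × Int × Int × Int) : Bool :=
  bValid tiles (horizLinesB tiles) r.1 r.2.1 r.2.2.1 r.2.2.2

def pvOkA (tiles : List (Int × Int)) (hls : List ((Int × Int) × (Int × Int)))
    (r : Int × Int × Int × Int) : Bool :=
  !(tiles.any (fun t => pointInRect t.1 t.2 r.1 r.2.1 r.2.2.1 r.2.2.2)) &&
    (hls.foldl (fun acc line => acc + (if lineRectIntersect line r then (1 : Int) else 0)) 0 == 0)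

def pvDictA (tiles : List (Int × Int)) : PySem.Dict (Int × Int × Int × Int) Int :=
  (pvCands tiles).foldl (fun d r => d.insert r (pvArea r)) PySem.Dict.empty

def pvSorted (tiles : List (Int × Int)) : List ((Int × Int × Int × Int) × Int) :=
  PySem.List.sorted (pvDictA tiles).items (fun p => p.2) true

def pvRunMax (o : Option Int) (a : Int) : Option Int :=
  match o with
  | none => some a
  | some m => if a > m then some a else some m

def pvIsMax (m : Int) (l : List Int) : Prop := m ∈ l ∧ ∀ x ∈ l, x ≤ m

-- ---- reshaping the two ports ----

lemma solve_eq (tiles : List (Int × Int)) :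
    solve tiles = solveLoopA tiles (horizLinesA tiles) (PySem.Dict.ofList (pvSorted tiles))
      (PySem.Dict.ofList (pvSorted tiles)).keys := by
  show (let n := PySem.List.len tiles
    let rectangles := (PySem.List.pyRange 0 (n - 1) 1).foldl (fun d i =>
        (PySem.List.pyRange 1 n 1).foldl (fun d j =>
          let t1 := PySem.List.pyGetD tiles i (0, 0)
          let t2 := PySem.List.pyGetD tiles j (0, 0)
          d.insert (t1.1, t1.2, t2.1, t2.2) ((|t2.1 - t1.1| + 1) * (|t2.2 - t1.2| + 1))) d)
      (PySem.Dict.empty : PySem.Dict (Int × Int × Int × Int) Int)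
    let rectangles2 := PySem.Dict.ofList (PySem.List.sorted rectangles.items (fun p => p.2) true)
    solveLoopA tiles (horizLinesA tiles) rectangles2 rectangles2.keys) = _
  have hdict : (PySem.List.pyRange 0 (PySem.List.len tiles - 1) 1).foldl (fun d i =>
      (PySem.List.pyRange 1 (PySem.List.len tiles) 1).foldl (fun d j =>
        let t1 := PySem.List.pyGetD tiles i (0, 0)
        let t2 := PySem.List.pyGetD tiles j (0, 0)
        d.insert (t1.1, t1.2, t2.1, t2.2) ((|t2.1 - t1.1| + 1) * (|t2.2 - t1.2| + 1))) d)
      (PySem.Dict.empty : PySem.Dict (Int × Int × Int × Int) Int) = pvDictA tiles := by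
    rw [pvDictA, pvCands, List.foldl_flatMap]
    simp only [List.foldl_map]
    rfl
  simp only []
  rw [hdict]
  rfl

lemma solve_alt_eq (tiles : List (Int × Int)) :
    solve_alt tiles =
      (match ((pvCands tiles).foldl (fun st r =>
          (pvRunMax st.1 (pvArea r),
           if (match st.2 with | none => true | some b => pvArea r > b) && pvOk tiles r
             then some (pvArea r) else st.2))
          ((none, none) : Option Int × Option Int)).2 with
       | some b => (((pvCands tiles).foldl (fun st r =>
          (pvRunMax st.1 (pvArea r),
           if (match st.2 with | none => true | some b => pvArea r > b) && pvOk tiles r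
             then some (pvArea r) else st.2))
          ((none, none) : Option Int × Option Int)).1.getD 0, b)
       | none => (0, 0)) := by
  rw [solve_alt]
  simp only []
  rw [pvCands, List.foldl_flatMap]
  simp only [List.foldl_map]
  rfl

-- ---- dictionary facts ----

lemma nodup_keys_pvDictA (tiles : List (Int × Int)) : (pvDictA tiles).keys.Nodup := by
  exact PySem.Dict.nodup_keys_foldl_insert _ (fun _ r => pvArea r) _
    (by simpa using PySem.Dict.nodup_keys_empty (κ := Int × Int × Int × Int) (ν := Int))

lemma keys_pvDictA (tiles : List (Int × Int)) :
    (pvDictA tiles).keys = PySem.Set.ofList (pvCands tiles) := by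
  rw [pvDictA, PySem.Dict.keys_foldl_insert, PySem.Dict.keys_empty, PySem.Set.update_nil_left]

lemma val_items_foldl (L : List (Int × Int × Int × Int))
    (d0 : PySem.Dict (Int × Int × Int × Int) Int)
    (h0 : ∀ p ∈ d0.items, p.2 = pvArea p.1) :
    ∀ p ∈ (L.foldl (fun d r => d.insert r (pvArea r)) d0).items, p.2 = pvArea p.1 := by
  induction L generalizing d0 with
  | nil => simpa using h0
  | cons a t ih =>
    intro p hp
    refine ih (d0.insert a (pvArea a)) ?_ p (by simpa using hp)
    intro q hq
    rcases (PySem.Dict.mem_items_insert _ _ _ _).1 hq with h | h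
    · subst h; rfl
    · exact h0 q h.1

lemma val_items_pvDictA (tiles : List (Int × Int)) :
    ∀ p ∈ (pvDictA tiles).items, p.2 = pvArea p.1 := by
  refine val_items_foldl _ _ ?_
  intro p hp
  simp [PySem.Dict.empty] at hp

lemma perm_pvSorted (tiles : List (Int × Int)) : (pvSorted tiles).Perm (pvDictA tiles).items :=
  PySem.List.sorted_perm _ _ _

lemma pairwise_pvSorted (tiles : List (Int × Int)) :
    (pvSorted tiles).Pairwise (fun a b => b.2 ≤ a.2) :=
  PySem.List.sorted_pairwise_rev _ _

lemma val_pvSorted (tiles : List (Int × Int)) : ∀ p ∈ pvSorted tiles, p.2 = pvArea p.1 := by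
  intro p hp
  exact val_items_pvDictA tiles p ((perm_pvSorted tiles).mem_iff.1 hp)

lemma nodup_fst_pvSorted (tiles : List (Int × Int)) :
    ((pvSorted tiles).map Prod.fst).Nodup := by
  have hperm := (perm_pvSorted tiles).map Prod.fst
  have : (pvDictA tiles).items.map Prod.fst = (pvDictA tiles).keys := rfl
  rw [this] at hperm
  exact hperm.nodup_iff.2 (nodup_keys_pvDictA tiles)

lemma items_ofList_pvSorted (tiles : List (Int × Int)) :
    (PySem.Dict.ofList (pvSorted tiles)).items = pvSorted tiles := by
  have h := PySem.Dict.items_foldl_insert_fresh (pvSorted tiles) Prod.fst Prod.snd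
    PySem.Dict.empty (fun a _ => PySem.Dict.contains_empty a.1) (nodup_fst_pvSorted tiles)
  simpa using h

lemma keys_ofList_pvSorted (tiles : List (Int × Int)) :
    (PySem.Dict.ofList (pvSorted tiles)).keys = (pvSorted tiles).map Prod.fst := by
  show (PySem.Dict.ofList (pvSorted tiles)).items.map Prod.fst = _
  rw [items_ofList_pvSorted]

lemma values_ofList_pvSorted (tiles : List (Int × Int)) :
    (PySem.Dict.ofList (pvSorted tiles)).values = (pvSorted tiles).map Prod.snd := by
  show (PySem.Dict.ofList (pvSorted tiles)).items.map Prod.snd = _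
  rw [items_ofList_pvSorted]

lemma getD_ofList_pvSorted (tiles : List (Int × Int)) {r : Int × Int × Int × Int} {v : Int}
    (h : (r, v) ∈ pvSorted tiles) : (PySem.Dict.ofList (pvSorted tiles)).getD r 0 = v := by
  refine PySem.Dict.getD_of_mem_items _ ?_ ?_ 0
  · rw [items_ofList_pvSorted]; exact h
  · rw [keys_ofList_pvSorted]; exact nodup_fst_pvSorted tiles

-- ---- membership bridges ----

lemma mem_fst_pvSorted_iff (tiles : List (Int × Int)) (r : Int × Int × Int × Int) :
    r ∈ (pvSorted tiles).map Prod.fst ↔ r ∈ pvCands tiles := by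
  have hperm := (perm_pvSorted tiles).map Prod.fst
  have hk : (pvDictA tiles).items.map Prod.fst = (pvDictA tiles).keys := rfl
  rw [hperm.mem_iff, hk, keys_pvDictA]
  apply PySem.Set.mem_ofList

lemma pair_mem_pvSorted (tiles : List (Int × Int)) {r : Int × Int × Int × Int}
    (h : r ∈ pvCands tiles) : (r, pvArea r) ∈ pvSorted tiles := by
  have : r ∈ (pvSorted tiles).map Prod.fst := (mem_fst_pvSorted_iff tiles r).2 h
  rcases List.mem_map.1 this with ⟨p, hp, hfst⟩
  have hv := val_pvSorted tiles p hp
  have : p = (r, pvArea r) := by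
    rcases p with ⟨p1, p2⟩
    simp only at hfst hv
    subst hfst; rw [hv]
  rwa [this] at hp

-- ---- the two validity tests agree ----

lemma bValid_eq (tiles : List (Int × Int)) (hls : List ((Int × Int) × (Int × Int)))
    (x1 y1 x2 y2 : Int) :
    bValid tiles hls x1 y1 x2 y2 =
      (!(tiles.any (fun t => min x1 x2 < t.1 && t.1 < max x1 x2 && min y1 y2 < t.2 && t.2 < max y1 y2)) &&
       !(hls.any (fun l => min l.1.1 l.2.1 ≤ min x1 x2 && max x1 x2 ≤ max l.1.1 l.2.1 &&
          min y1 y2 < l.1.2 && l.1.2 < max y1 y2))) := by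
  rw [bValid]
  by_cases h1 : tiles.any (fun t => min x1 x2 < t.1 && t.1 < max x1 x2 && min y1 y2 < t.2 && t.2 < max y1 y2)
  · simp [h1]
  · by_cases h2 : hls.any (fun l => min l.1.1 l.2.1 ≤ min x1 x2 && max x1 x2 ≤ max l.1.1 l.2.1 &&
        min y1 y2 < l.1.2 && l.1.2 < max y1 y2)
    · simp [h1, h2]
    · simp [h1, h2]

lemma lineRect_eq (l : (Int × Int) × (Int × Int)) (r : Int × Int × Int × Int) :
    lineRectIntersect l r =
      (min l.1.1 l.2.1 ≤ min r.1 r.2.2.1 && max r.1 r.2.2.1 ≤ max l.1.1 l.2.1 &&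
       min r.2.1 r.2.2.2 < l.1.2 && l.1.2 < max r.2.1 r.2.2.2) := by
  rw [lineRectIntersect]
  apply Bool.eq_iff_iff.2
  simp only [Bool.and_eq_true, Bool.or_eq_true, Bool.and_assoc, beq_iff_eq, ge_iff_le,
    decide_eq_true_eq]
  constructor
  · rintro ⟨h1 | h2, hy1, hy2⟩
    · exact ⟨h1.1, h1.2, hy1, hy2⟩
    · exact ⟨le_of_eq h2.2, h2.1, hy1, hy2⟩
  · rintro ⟨ha, hb, hy1, hy2⟩
    exact ⟨Or.inl ⟨ha, hb⟩, hy1, hy2⟩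

lemma sum_ind_zero_iff (r : Int × Int × Int × Int) (L : List ((Int × Int) × (Int × Int))) :
    (L.map (fun line => if lineRectIntersect line r then (1 : Int) else 0)).sum = 0 ↔
      ∀ l ∈ L, ¬ lineRectIntersect l r = true := by
  induction L with
  | nil => simp
  | cons a t ih =>
    have hnn : 0 ≤ (t.map (fun line => if lineRectIntersect line r then (1 : Int) else 0)).sum := by
      apply List.sum_nonneg
      intro x hx
      rcases List.mem_map.1 hx with ⟨y, _, hy⟩
      subst hy
      split <;> omega
    rw [List.map_cons, List.sum_cons]
    by_cases ha : lineRectIntersect a r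
    · rw [if_pos ha]
      constructor
      · intro h; omega
      · intro h; exact absurd ha (h a (List.mem_cons.2 (Or.inl rfl)))
    · rw [if_neg ha, zero_add, ih]
      constructor
      · intro h l hl
        rcases List.mem_cons.1 hl with rfl | hl
        · exact ha
        · exact h l hl
      · intro h l hl
        exact h l (List.mem_cons.2 (Or.inr hl))

lemma count_zero_iff_not_any (hls : List ((Int × Int) × (Int × Int))) (r : Int × Int × Int × Int) :
    (hls.foldl (fun acc line => acc + (if lineRectIntersect line r then (1 : Int) else 0)) 0 == 0) =
      !(hls.any (fun l => lineRectIntersect l r)) := by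
  rw [PySem.List.foldl_add, zero_add]
  apply Bool.eq_iff_iff.2
  rw [beq_iff_eq, Bool.not_eq_true', List.any_eq_false]
  exact sum_ind_zero_iff r hls

lemma ok_eq (tiles : List (Int × Int)) :
    pvOkA tiles (horizLinesA tiles) = pvOk tiles := by
  funext r
  rw [pvOkA, pvOk, count_zero_iff_not_any, bValid_eq,
    show horizLinesA tiles = horizLinesB tiles from rfl]
  simp only [pointInRect, lineRect_eq, Bool.and_assoc]

-- ---- A-side loop characterisation ----

lemma loopA_char (tiles : List (Int × Int)) (hls : List ((Int × Int) × (Int × Int)))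
    (d : PySem.Dict (Int × Int × Int × Int) Int) :
    ∀ ks, solveLoopA tiles hls d ks =
      match ks.find? (pvOkA tiles hls) with
      | some r => ((PySem.List.max? d.values (fun v => v)).getD 0, d.getD r 0)
      | none => (0, 0) := by
  intro ks
  induction ks with
  | nil => simp [solveLoopA]
  | cons r rest ih =>
    rw [solveLoopA]
    simp only []
    by_cases hc : tiles.any (fun t => pointInRect t.1 t.2 r.1 r.2.1 r.2.2.1 r.2.2.2)
    · rw [if_pos hc, ih, List.find?_cons_of_neg]
      simp [pvOkA, hc]
    · rw [if_neg hc]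
      by_cases hli : (hls.foldl (fun acc line => acc + (if lineRectIntersect line r then (1 : Int) else 0)) 0 == 0)
      · rw [if_pos hli, List.find?_cons_of_pos]
        simp [pvOkA, hc, hli]
      · rw [if_neg hli, ih, List.find?_cons_of_neg]
        simp only [pvOkA, Bool.and_eq_true, Bool.not_eq_true'] at hli ⊢
        intro h
        exact hli (by simpa using h.2)

-- ---- B-side fold characterisation ----

lemma foldl_pair {α : Type} (f : Option Int → α → Option Int) (g : Option Int → α → Option Int)
    (L : List α) : ∀ a b, L.foldl (fun st r => (f st.1 r, g st.2 r)) (a, b) =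
      (L.foldl f a, L.foldl g b) := by
  induction L with
  | nil => intro a b; rfl
  | cons x t ih => intro a b; exact ih (f a x) (g b x)

lemma runMax_some (L : List Int) : ∀ m, L.foldl pvRunMax (some m) = some (L.foldl max m) := by
  induction L with
  | nil => intro m; rfl
  | cons a t ih =>
    intro m
    have hstep : pvRunMax (some m) a = some (max m a) := by
      simp only [pvRunMax]
      split_ifs with h
      · rw [max_eq_right (le_of_lt h)]
      · rw [max_eq_left (by omega)]
    rw [List.foldl_cons, hstep, ih, List.foldl_cons]

lemma runMax_none_char (L : List Int) :
    L.foldl pvRunMax none = match L with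
      | [] => none
      | a :: t => some (t.foldl max a) := by
  cases L with
  | nil => rfl
  | cons a t =>
    rw [List.foldl_cons]
    exact runMax_some t a

lemma best_fold_eq (tiles : List (Int × Int)) (L : List (Int × Int × Int × Int)) :
    ∀ o, L.foldl (fun o r =>
        if (match o with | none => true | some b => pvArea r > b) && pvOk tiles r
          then some (pvArea r) else o) o =
      ((L.filter (pvOk tiles)).map pvArea).foldl pvRunMax o := by
  induction L with
  | nil => intro o; rfl
  | cons r t ih =>
    intro o
    by_cases hr : pvOk tiles r
    · rw [List.foldl_cons, List.filter_cons_of_pos hr, List.map_cons, List.foldl_cons]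
      have : (if (match o with | none => true | some b => pvArea r > b) && pvOk tiles r
          then some (pvArea r) else o) = pvRunMax o (pvArea r) := by
        cases o with
        | none => simp [hr, pvRunMax]
        | some b =>
          rw [pvRunMax]
          by_cases hb : pvArea r > b
          · simp [hr, hb]
          · simp [hr, hb]
      rw [this, ih]
    · rw [List.foldl_cons, List.filter_cons_of_neg hr]
      have : (if (match o with | none => true | some b => pvArea r > b) && pvOk tiles r
          then some (pvArea r) else o) = o := by
        simp [hr]
      rw [this, ih]

-- ---- maxima ----

lemma foldl_max_isMax (t : List Int) : ∀ a, pvIsMax (t.foldl max a) (a :: t) := by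
  induction t with
  | nil =>
    intro a
    constructor
    · simp
    · intro x hx
      simp only [List.foldl_nil]
      simp at hx
      omega
  | cons b t ih =>
    intro a
    rcases ih (max a b) with ⟨hmem, hbound⟩
    constructor
    · rw [List.foldl_cons]
      rcases List.mem_cons.1 hmem with h | h
      · rcases max_choice a b with hm | hm
        · exact List.mem_cons.2 (Or.inl (h.trans hm))
        · exact List.mem_cons.2 (Or.inr (List.mem_cons.2 (Or.inl (h.trans hm))))
      · exact List.mem_cons.2 (Or.inr (List.mem_cons.2 (Or.inr h)))
    · intro x hx
      rw [List.foldl_cons]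
      rcases List.mem_cons.1 hx with h | hx'
      · rw [h]
        exact le_trans (le_max_left a b) (hbound (max a b) (by simp))
      · rcases List.mem_cons.1 hx' with h | h
        · rw [h]
          exact le_trans (le_max_right a b) (hbound (max a b) (by simp))
        · exact hbound x (List.mem_cons.2 (Or.inr h))

lemma isMax_unique {m m' : Int} {l l' : List Int} (h : pvIsMax m l) (h' : pvIsMax m' l')
    (hset : ∀ x, x ∈ l ↔ x ∈ l') : m = m' := by
  rcases h with ⟨hm, hb⟩
  rcases h' with ⟨hm', hb'⟩
  exact le_antisymm (hb' m ((hset m).1 hm)) (hb m' ((hset m').2 hm'))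

-- ---- first valid key in descending order is the valid maximum ----

lemma first_ok_max (tiles : List (Int × Int)) :
    ∀ (s : List ((Int × Int × Int × Int) × Int)) (q : (Int × Int × Int × Int) × Int),
      s.Pairwise (fun a b => b.2 ≤ a.2) → (∀ p ∈ s, p.2 = pvArea p.1) →
      s.find? (fun p => pvOk tiles p.1) = some q →
      pvIsMax q.2 (((s.map Prod.fst).filter (pvOk tiles)).map pvArea) := by
  intro s
  induction s with
  | nil => intro q _ _ h; simp at h
  | cons p t ih =>
    intro q hpw hval hfind
    rcases List.pairwise_cons.1 hpw with ⟨hpt, hpw'⟩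
    by_cases hp : pvOk tiles p.1
    · rw [List.find?_cons_of_pos (by simpa using hp)] at hfind
      have hq : q = p := by injection hfind with h; exact h.symm
      rw [hq, List.map_cons, List.filter_cons_of_pos hp, List.map_cons]
      have hvp : p.2 = pvArea p.1 := hval p (List.mem_cons.2 (Or.inl rfl))
      constructor
      · exact List.mem_cons.2 (Or.inl hvp)
      · intro x hx
        rcases List.mem_cons.1 hx with h | h
        · rw [hvp, h]
        · rcases List.mem_map.1 h with ⟨r, hr, hxr⟩
          rcases List.mem_filter.1 hr with ⟨hrm, _⟩
          rcases List.mem_map.1 hrm with ⟨p', hp', hfst⟩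
          have hv' := hval p' (List.mem_cons.2 (Or.inr hp'))
          calc x = pvArea r := hxr.symm
            _ = pvArea p'.1 := by rw [hfst]
            _ = p'.2 := hv'.symm
            _ ≤ p.2 := hpt p' hp' 
    · rw [List.find?_cons_of_neg (by simpa using hp)] at hfind
      have := ih q hpw' (fun p' h => hval p' (List.mem_cons.2 (Or.inr h))) hfind
      rw [List.map_cons, List.filter_cons_of_neg hp]
      exact this


-- ---- final assembly ----

lemma bfold_eq (tiles : List (Int × Int)) (L : List (Int × Int × Int × Int)) :
    L.foldl (fun st r =>
        (pvRunMax st.1 (pvArea r),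
         if (match st.2 with | none => true | some b => pvArea r > b) && pvOk tiles r
           then some (pvArea r) else st.2))
      ((none, none) : Option Int × Option Int) =
    (L.foldl (fun o r => pvRunMax o (pvArea r)) none,
     L.foldl (fun o r =>
        if (match o with | none => true | some b => pvArea r > b) && pvOk tiles r
          then some (pvArea r) else o) none) :=
  foldl_pair (fun o r => pvRunMax o (pvArea r))
    (fun o r => if (match o with | none => true | some b => pvArea r > b) && pvOk tiles r
      then some (pvArea r) else o) L none none

lemma mem_snd_iff (tiles : List (Int × Int)) (x : Int) :
    x ∈ (pvSorted tiles).map Prod.snd ↔ x ∈ (pvCands tiles).map pvArea := by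
  constructor
  · intro hx
    rcases List.mem_map.1 hx with ⟨p, hp, hx⟩
    have hv := val_pvSorted tiles p hp
    have h1 : p.1 ∈ (pvSorted tiles).map Prod.fst := List.mem_map.2 ⟨p, hp, rfl⟩
    have hc : p.1 ∈ pvCands tiles := (mem_fst_pvSorted_iff tiles p.1).1 h1
    exact List.mem_map.2 ⟨p.1, hc, by rw [← hv, hx]⟩
  · intro hx
    rcases List.mem_map.1 hx with ⟨r, hr, hx⟩
    exact List.mem_map.2 ⟨(r, pvArea r), pair_mem_pvSorted tiles hr, hx⟩

lemma mem_okareas_iff (tiles : List (Int × Int)) (x : Int) :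
    x ∈ (((pvSorted tiles).map Prod.fst).filter (pvOk tiles)).map pvArea ↔
      x ∈ ((pvCands tiles).filter (pvOk tiles)).map pvArea := by
  constructor <;> intro hx <;> rcases List.mem_map.1 hx with ⟨r, hr, hx⟩ <;>
    rcases List.mem_filter.1 hr with ⟨hrm, hrok⟩
  · exact List.mem_map.2 ⟨r, List.mem_filter.2 ⟨(mem_fst_pvSorted_iff tiles r).1 hrm, hrok⟩, hx⟩
  · exact List.mem_map.2 ⟨r, List.mem_filter.2 ⟨(mem_fst_pvSorted_iff tiles r).2 hrm, hrok⟩, hx⟩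

lemma main_eq (tiles : List (Int × Int)) : solve tiles = solve_alt tiles := by
  rw [solve_eq, solve_alt_eq, loopA_char, keys_ofList_pvSorted, ok_eq, bfold_eq]
  simp only []
  rw [best_fold_eq, values_ofList_pvSorted, List.find?_map]
  by_cases hex : ∃ r ∈ pvCands tiles, pvOk tiles r = true
  · rcases hex with ⟨r0, hr0c, hr0ok⟩
    -- the find? over the sorted items succeeds
    have hpair0 : (r0, pvArea r0) ∈ pvSorted tiles := pair_mem_pvSorted tiles hr0c
    obtain ⟨q, hfq⟩ : ∃ q, (pvSorted tiles).find? (fun p => pvOk tiles ((Prod.fst : _ × Int → _) p)) = some q := by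
      cases hf : (pvSorted tiles).find? (fun p => pvOk tiles ((Prod.fst : _ × Int → _) p)) with
      | none =>
        exact absurd (by simpa using hr0ok)
          (List.find?_eq_none.1 hf (r0, pvArea r0) hpair0)
      | some q => exact ⟨q, rfl⟩
    have hfq' : (pvSorted tiles).find? ((pvOk tiles) ∘ Prod.fst) = some q := hfq
    rw [hfq']
    -- B's best-valid list is nonempty
    have hxb : pvArea r0 ∈ ((pvCands tiles).filter (pvOk tiles)).map pvArea :=
      List.mem_map.2 ⟨r0, List.mem_filter.2 ⟨hr0c, hr0ok⟩, rfl⟩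
    cases hlb : ((pvCands tiles).filter (pvOk tiles)).map pvArea with
    | nil => rw [hlb] at hxb; simp at hxb
    | cons a t =>
      rw [runMax_none_char]
      simp only [Option.map_some]
      -- best valid area
      have hmaxb : pvIsMax (t.foldl max a) (a :: t) := foldl_max_isMax t a
      have hqmax : pvIsMax q.2 ((((pvSorted tiles).map Prod.fst).filter (pvOk tiles)).map pvArea) := by
        exact first_ok_max tiles (pvSorted tiles) q (pairwise_pvSorted tiles)
          (val_pvSorted tiles) (by exact hfq)
      have hq2 : q.2 = t.foldl max a := by
        refine isMax_unique hqmax hmaxb ?_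
        intro x
        rw [mem_okareas_iff, hlb]
      have hgd : (PySem.Dict.ofList (pvSorted tiles)).getD q.1 0 = q.2 := by
        have hqs : q ∈ pvSorted tiles := List.mem_of_find?_eq_some hfq
        exact getD_ofList_pvSorted tiles (by simpa using hqs)
      -- overall max
      have hsa : pvArea r0 ∈ (pvCands tiles).map pvArea :=
        List.mem_map.2 ⟨r0, hr0c, rfl⟩
      cases hla : (pvCands tiles).map pvArea with
      | nil => rw [hla] at hsa; simp at hsa
      | cons a' t' =>
        rw [← List.foldl_map, hla, runMax_none_char]
        simp only []
        have hsnd : (pvArea r0) ∈ (pvSorted tiles).map Prod.snd :=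
          List.mem_map.2 ⟨(r0, pvArea r0), hpair0, rfl⟩
        cases hm : PySem.List.max? ((pvSorted tiles).map Prod.snd) (fun v => v) with
        | none =>
          rw [(PySem.List.max?_eq_none_iff _ _).1 hm] at hsnd
          simp at hsnd
        | some m =>
          have hmmax : pvIsMax m ((pvSorted tiles).map Prod.snd) :=
            ⟨PySem.List.max?_mem hm, fun y hy => PySem.List.max?_isMax hm y hy⟩
          have hmax' : pvIsMax (t'.foldl max a') (a' :: t') := foldl_max_isMax t' a'
          have hm2 : m = t'.foldl max a' := by
            refine isMax_unique hmmax hmax' ?_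
            intro x
            rw [mem_snd_iff, hla]
          simp only [Option.getD_some]
          rw [hm2, hgd, hq2]
  · -- no valid rectangle: both ports fall through
    push_neg at hex
    have hfn : (pvSorted tiles).find? ((pvOk tiles) ∘ Prod.fst) = none := by
      apply List.find?_eq_none.2
      intro p hp
      have h1 : p.1 ∈ (pvSorted tiles).map Prod.fst := List.mem_map.2 ⟨p, hp, rfl⟩
      have hc : p.1 ∈ pvCands tiles := (mem_fst_pvSorted_iff tiles p.1).1 h1
      simpa using hex p.1 hc
    have hfe : (pvCands tiles).filter (pvOk tiles) = [] := by
      apply List.filter_eq_nil_iff.2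
      intro r hr
      simpa using hex r hr
    rw [hfn, hfe]
    rfl

-- ===== VERDICT (by name: the statement is the Claim_ definition above) =====
theorem solve_spec : Claim_equal_solve := by
  intro tiles _ _
  unfold Spec_solve
  exact main_eq tiles
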